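-- pv_equiv track=rewrite | github.com/Okeke12nancy/Learnable_Test | learnable.py | nth_most_rate
-- ===== SOURCE A (Python) =====
-- from collections import Counter
-- from heapq import heapify, heappop
--
-- def nth_most_rate(list, n):
--     # count number of occurences of elements in l
--     count = Counter(list)
--     # Load (freq, num) into nums
--     nums = [(v, k) for k, v in count.items()]
--     # Convert the array into a heap
--     # heap priority is based on the freq of the element
--     heapify(nums)
--
--     # Track the results
--     res = -1
--     # Pop from our heap starting from the smallest count
--     while n:
--         _, res = heappop(nums)
--         n -= 1
--     return res
-- ===== SOURCE B (Python) =====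
-- def nth_most_rate(list, n):
--     if not n:
--         return -1
--     count = {}
--     for x in list:
--         count[x] = count.get(x, 0) + 1
--     pairs = sorted((v, k) for k, v in count.items())
--     return pairs[n - 1][1]
-- ===== Notes on version B (the rewrite author's own statement) =====
-- stated objective: simpler
-- what changed: B drops the heap entirely: it counts with a plain dict loop, sorts the (freq, value) pairs once, and indexes pairs[n-1] directly (returning -1 for n=0 as A does), instead of A's Counter + heapify + n heappops.
import Mathlib
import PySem

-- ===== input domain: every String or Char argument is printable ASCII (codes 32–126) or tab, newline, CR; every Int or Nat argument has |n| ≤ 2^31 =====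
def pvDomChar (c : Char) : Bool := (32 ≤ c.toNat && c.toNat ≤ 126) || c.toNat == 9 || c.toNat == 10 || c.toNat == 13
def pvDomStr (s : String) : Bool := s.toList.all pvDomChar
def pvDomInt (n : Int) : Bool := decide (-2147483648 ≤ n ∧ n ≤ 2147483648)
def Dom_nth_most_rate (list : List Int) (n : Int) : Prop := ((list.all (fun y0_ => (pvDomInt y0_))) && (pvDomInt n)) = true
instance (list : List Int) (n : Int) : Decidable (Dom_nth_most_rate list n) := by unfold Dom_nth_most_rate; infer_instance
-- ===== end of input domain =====

-- B replaces A's heap (heapify + n heappops) by building the count dict once, sorting the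
-- (freq, value) pairs and indexing the (n-1)-th pair directly; objective: simpler.

-- ===== PORT A =====
-- Python tuple order on (freq, num) pairs = lexicographic order
def pvKey (p : Int × Int) : Int ×ₗ Int := toLex p

-- the 'while n: _, res = heappop(nums); n -= 1' loop: each heappop returns (and removes)
-- the current minimum of the heap in Python tuple order (semantic port of heapq's contract)
def popA : Nat → List (Int × Int) → Int → Int
  | 0, _, res => res
  | k+1, nums, res =>
    match PySem.List.min? nums pvKey with
    | none => popA k nums res   -- heappop on an empty heap: Python raises IndexError (outside Pre_)
    | some m => popA k (nums.erase m) m.2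

def nth_most_rate (list : List Int) (n : Int) : Int :=
  let count := PySem.Dict.counter list
  let nums := count.items.map (fun kv => (kv.2, kv.1))
  popA n.toNat nums (-1)

-- ===== PORT B =====
def nth_most_rate_alt (list : List Int) (n : Int) : Int :=
  if n == 0 then -1
  else
    let count := list.foldl (fun d x => PySem.Dict.insert d x (PySem.Dict.getD d x 0 + 1)) PySem.Dict.empty
    let pairs := PySem.List.sorted (count.items.map (fun kv => (kv.2, kv.1))) pvKey false
    ((PySem.List.pyGet? pairs (n - 1)).getD (0, -1)).2

-- ===== PRECONDITION & SPEC =====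
-- Pre_ excludes exactly the inputs where A raises IndexError (heappop on an exhausted heap,
-- reached whenever n is negative or exceeds the number of distinct elements).
def Pre_nth_most_rate (list : List Int) (n : Int) : Prop :=
  0 ≤ n ∧ n ≤ (PySem.List.dedup list).length
instance (list : List Int) (n : Int) : Decidable (Pre_nth_most_rate list n) := by
  unfold Pre_nth_most_rate; infer_instance

def pvWitness_nth_most_rate : List Int × Int := ([3, 1, 3, 2, 1, 3], 2)

def Spec_nth_most_rate (list : List Int) (n : Int) (out : Int) : Prop := out = nth_most_rate_alt list n
instance (list : List Int) (n : Int) (out : Int) : Decidable (Spec_nth_most_rate list n out) := by unfold Spec_nth_most_rate; infer_instance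

-- ===== CLAIM (what is proved, stated in full; the proofs are below) =====
def Claim_equal_nth_most_rate : Prop := ∀ (list : List Int) (n : Int), Dom_nth_most_rate list n → Pre_nth_most_rate list n → Spec_nth_most_rate list n (nth_most_rate list n)

-- ===== LEMMAS AND PROOFS =====

-- extracting the minimum (with pairwise-distinct keys) yields the head of the sorted list
theorem min?_eq_head_sorted (L : List (Int × Int)) (hnd : (L.map pvKey).Nodup)
    (m : Int × Int) (t : List (Int × Int))
    (hS : PySem.List.sorted L pvKey false = m :: t) :
    PySem.List.min? L pvKey = some m := by
  have hLne : L ≠ [] := by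
    intro h; rw [h] at hS; simp [PySem.List.sorted] at hS
  obtain ⟨m', hm'⟩ : ∃ m', PySem.List.min? L pvKey = some m' := by
    cases h : PySem.List.min? L pvKey with
    | none => exact absurd ((PySem.List.min?_eq_none_iff L pvKey).mp h) hLne
    | some x => exact ⟨x, rfl⟩
  have hmem' : m' ∈ L := PySem.List.min?_mem hm'
  have hmem : m ∈ L := (PySem.List.sorted_perm L pvKey false).mem_iff.mp (by rw [hS]; simp)
  have h1 : pvKey m' ≤ pvKey m := PySem.List.min?_isMin hm' m hmem
  have h2 : pvKey m ≤ pvKey m' := PySem.List.key_head_sorted_le L pvKey hS m' hmem'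
  have : m' = m := List.inj_on_of_nodup_map hnd hmem' hmem (le_antisymm h1 h2)
  rw [hm', this]

-- with pairwise-distinct keys the sorted list is strictly increasing
theorem sorted_pairwise_lt (L : List (Int × Int)) (hnd : (L.map pvKey).Nodup) :
    List.Pairwise (fun a b => pvKey a < pvKey b) (PySem.List.sorted L pvKey false) := by
  have hle := PySem.List.sorted_pairwise L pvKey
  have hne : List.Pairwise (fun a b => pvKey a ≠ pvKey b) (PySem.List.sorted L pvKey false) := by
    have : (List.map pvKey (PySem.List.sorted L pvKey false)).Nodup :=
      hnd.perm ((PySem.List.sorted_perm L pvKey false).map pvKey).symm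
    rw [List.nodup_iff_pairwise_ne, List.pairwise_map] at this
    exact this
  exact (hle.and hne).imp (fun h => lt_of_le_of_ne h.1 h.2)

-- removing the minimum removes the head of the sorted list
theorem sorted_erase_head (L : List (Int × Int)) (hnd : (L.map pvKey).Nodup)
    (m : Int × Int) (t : List (Int × Int))
    (hS : PySem.List.sorted L pvKey false = m :: t) :
    PySem.List.sorted (L.erase m) pvKey false = t := by
  have hmem : m ∈ L := (PySem.List.sorted_perm L pvKey false).mem_iff.mp (by rw [hS]; simp)
  have hperm : (m :: t).Perm (m :: L.erase m) := by
    rw [← hS]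
    exact (PySem.List.sorted_perm L pvKey false).trans (List.perm_cons_erase hmem)
  have hlt := sorted_pairwise_lt L hnd
  rw [hS] at hlt
  exact PySem.List.sorted_eq_of_perm_of_pairwise_lt _ _ _ hperm.cons_inv (List.pairwise_cons.mp hlt).2

-- k successive min-extractions land on the (k-1)-th element of the sorted list
theorem popA_eq_sorted (k : Nat) (L : List (Int × Int)) (res : Int)
    (hnd : (L.map pvKey).Nodup) (h1 : 1 ≤ k) (h2 : k ≤ L.length) :
    popA k L res = ((PySem.List.sorted L pvKey false).getD (k-1) (0, -1)).2 := by
  induction k generalizing L res with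
  | zero => omega
  | succ k ih =>
    have hLne : L ≠ [] := by intro h; rw [h] at h2; simp at h2
    obtain ⟨m, t, hS⟩ : ∃ m t, PySem.List.sorted L pvKey false = m :: t := by
      cases h : PySem.List.sorted L pvKey false with
      | nil => exact absurd ((PySem.List.sorted_eq_nil_iff L pvKey false).mp h) hLne
      | cons a b => exact ⟨a, b, rfl⟩
    have hmin := min?_eq_head_sorted L hnd m t hS
    have hmem : m ∈ L := PySem.List.min?_mem hmin
    rcases Nat.eq_or_lt_of_le h1 with h1' | h1'
    · -- k+1 = 1
      have hk : k = 0 := by omega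
      subst hk
      rw [hS]
      simp [popA, hmin, List.getD]
    · -- k ≥ 1
      have hk1 : 1 ≤ k := by omega
      have hnd' : ((L.erase m).map pvKey).Nodup :=
        (((List.erase_sublist : (L.erase m).Sublist L)).map pvKey).nodup hnd
      have hlen : k ≤ (L.erase m).length := by
        rw [List.length_erase_of_mem hmem]; omega
      have := ih (L.erase m) m.2 hnd' hk1 hlen
      rw [sorted_erase_head L hnd m t hS] at this
      simp only [popA, hmin]
      rw [this, hS]
      have : k + 1 - 1 = (k - 1) + 1 := by omega
      rw [this]
      simp [List.getD]

-- ===== VERDICT (by name: the statement is the Claim_ definition above) =====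
theorem nth_most_rate_spec : Claim_equal_nth_most_rate := by
  intro list n _ hpre
  obtain ⟨h0, hle⟩ := hpre
  unfold Spec_nth_most_rate nth_most_rate nth_most_rate_alt
  by_cases hn : n = 0
  · subst hn; simp [popA]
  · have hn1 : 1 ≤ n := by omega
    simp only [beq_iff_eq, hn, if_false, PySem.Dict.foldl_insert_getD_add_one_eq_counter]
    set L := (PySem.Dict.counter list).items.map (fun kv : Int × Int => (kv.2, kv.1)) with hL
    have hLeq : L = (PySem.Set.ofList list).map (fun k => ((list.count k : Int), k)) := by
      rw [hL, PySem.Dict.items_counter, List.map_map]; rfl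
    have hnd : (L.map pvKey).Nodup := by
      rw [hLeq, List.map_map]
      refine List.Nodup.map_on ?_ (PySem.Set.nodup_ofList list)
      intro x _ y _ h
      have := congrArg (fun z => (ofLex z).2) h
      simpa [pvKey] using this
    have hlenL : L.length = (PySem.List.dedup list).length := by
      rw [hLeq, List.length_map, PySem.List.dedup_eq_ofList]
    have h2 : n.toNat ≤ L.length := by omega
    have h1 : 1 ≤ n.toNat := by omega
    rw [popA_eq_sorted n.toNat L (-1) hnd h1 h2]
    have hcast : n - 1 = ((n.toNat - 1 : Nat) : Int) := by omega
    rw [hcast, PySem.List.pyGet?_natCast, List.getD_eq_getElem?_getD]
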